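-- pv_equiv track=rewrite | github.com/D4LGONA/script_python | 중간고사/6.py | check_krokod
-- ===== SOURCE A (Python) =====
-- def check_krokod(ls):
--     cnt = 0
--     while True:
--         if ls[0] >= 1 and ls[1] >= 2 and ls[2] >= 2 and ls[3] >= 1:
--             ls[0] -= 1
--             ls[1] -= 2
--             ls[2] -= 2
--             ls[3] -= 1
--             cnt += 1
--         else:
--             break
--     return cnt * 7
-- ===== SOURCE B (Python) =====
-- def check_krokod(ls):
--     # closed form: each assembly consumes 1 of ls[0], 2 of ls[1], 2 of ls[2], 1 of ls[3]
--     n = max(0, min(ls[0], ls[1] // 2, ls[2] // 2, ls[3]))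
--     ls[0] -= n
--     ls[1] -= 2 * n
--     ls[2] -= 2 * n
--     ls[3] -= n
--     return 7 * n
-- ===== Notes on version B (the rewrite author's own statement) =====
-- stated objective: simpler
-- what changed: Replaces the one-assembly-at-a-time subtraction loop by the closed form 7*max(0, min(ls[0], ls[1]//2, ls[2]//2, ls[3])) with a single bulk subtraction for the mutation.
-- outside the precondition, e.g. on check_krokod([0]): A returns 0, B raises IndexError
import Mathlib
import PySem

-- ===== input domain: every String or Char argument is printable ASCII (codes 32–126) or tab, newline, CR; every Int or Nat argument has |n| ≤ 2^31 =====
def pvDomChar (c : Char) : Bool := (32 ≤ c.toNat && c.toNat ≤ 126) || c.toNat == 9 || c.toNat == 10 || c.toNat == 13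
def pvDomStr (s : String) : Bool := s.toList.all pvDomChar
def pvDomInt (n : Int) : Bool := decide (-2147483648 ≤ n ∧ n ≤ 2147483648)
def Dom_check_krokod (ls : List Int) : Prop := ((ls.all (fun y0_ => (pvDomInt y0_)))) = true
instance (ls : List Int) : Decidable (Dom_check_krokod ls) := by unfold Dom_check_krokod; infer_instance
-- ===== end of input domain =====

-- B replaces A's one-assembly-at-a-time loop by the closed form
-- 7 * max(0, min(ls[0], ls[1]//2, ls[2]//2, ls[3])).  Both Pythons mutate ls
-- identically (A by repeated, B by one bulk subtraction); the equivalence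
-- proved here is about the return value.

-- ===== PORT A =====
-- A's while-loop on the four counters and the accumulator cnt.
def krokodLoop (a b c d cnt : Int) : Int :=
  if a ≥ 1 ∧ b ≥ 2 ∧ c ≥ 2 ∧ d ≥ 1 then
    krokodLoop (a - 1) (b - 2) (c - 2) (d - 1) (cnt + 1)
  else cnt
termination_by a.toNat
decreasing_by omega

def check_krokod (ls : List Int) : Int :=
  krokodLoop (ls.getD 0 0) (ls.getD 1 0) (ls.getD 2 0) (ls.getD 3 0) 0 * 7

-- ===== PORT B =====
def check_krokod_alt (ls : List Int) : Int :=
  7 * max 0 (min (ls.getD 0 0)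
      (min (PySem.Int.floordiv (ls.getD 1 0) 2)
        (min (PySem.Int.floordiv (ls.getD 2 0) 2) (ls.getD 3 0))))

-- ===== PRECONDITION & SPEC =====
-- Pre_ excludes lists of fewer than 4 elements: there A's short-circuit
-- condition either raises IndexError or accidentally returns 0 before reaching
-- the missing index, while B always reads all four resources and raises.
def Pre_check_krokod (ls : List Int) : Prop := 4 ≤ ls.length
instance (ls : List Int) : Decidable (Pre_check_krokod ls) := by unfold Pre_check_krokod; infer_instance
def pvWitness_check_krokod : List Int := [3, 5, 9, 2]

def Spec_check_krokod (ls : List Int) (out : Int) : Prop := out = check_krokod_alt ls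
instance (ls : List Int) (out : Int) : Decidable (Spec_check_krokod ls out) := by unfold Spec_check_krokod; infer_instance

-- ===== CLAIM =====
def Claim_equal_check_krokod : Prop := ∀ (ls : List Int), Dom_check_krokod ls → Pre_check_krokod ls → Spec_check_krokod ls (check_krokod ls)

-- ===== LEMMAS AND PROOFS =====
theorem krokodLoop_eq (a b c d cnt : Int) :
    krokodLoop a b c d cnt =
      cnt + max 0 (min a (min (PySem.Int.floordiv b 2)
        (min (PySem.Int.floordiv c 2) d))) := by
  induction a, b, c, d, cnt using krokodLoop.induct with
  | case1 a b c d cnt h ih =>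
    rw [krokodLoop, if_pos h, ih,
      PySem.Int.floordiv_eq_ediv_of_pos (b := 2) (by omega),
      PySem.Int.floordiv_eq_ediv_of_pos (b := 2) (by omega),
      PySem.Int.floordiv_eq_ediv_of_pos (b := 2) (by omega),
      PySem.Int.floordiv_eq_ediv_of_pos (b := 2) (by omega)]
    omega
  | case2 a b c d cnt h =>
    rw [krokodLoop, if_neg h,
      PySem.Int.floordiv_eq_ediv_of_pos (b := 2) (by omega),
      PySem.Int.floordiv_eq_ediv_of_pos (b := 2) (by omega)]
    omega

-- ===== VERDICT =====
theorem check_krokod_spec : Claim_equal_check_krokod := by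
  intro ls _ _
  unfold Spec_check_krokod check_krokod check_krokod_alt
  rw [krokodLoop_eq]
  ring
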